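-- pv_equiv track=rewrite | github.com/hhummel/codewars-kata | python/hard_sudoku.py | find_first_grid
-- ===== SOURCE A (Python) =====
-- def add_rows(row1, row2):
--     for col in range(len(row1[0])):
--         col_set = set()
--         for row in range(len(row1)):
--             col_set.add(row1[row][col])
--         for row in range(len(row2)):
--             if row2[row][col] in col_set:
--                 return False
--     return row1 + row2
--
-- def find_first_grid(rows):
--     first_pair = [add_rows(rows[0][j], rows[1][k])
--                      for j in range(len(rows[0]))
--                          for k in range(len(rows[1]))
--                              if add_rows(rows[0][j], rows[1][k])]
--
--     for j in range(len(first_pair)):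
--         for k in range(len(rows[2])):
--             if add_rows(first_pair[j], rows[2][k]):
--                 return add_rows(first_pair[j], rows[2][k])
-- ===== SOURCE B (Python) =====
-- def add_rows(row1, row2):
--     for col in range(len(row1[0])):
--         col_set = {r[col] for r in row1}
--         for r in row2:
--             if r[col] in col_set:
--                 return False
--     return row1 + row2
--
-- def find_first_grid(rows):
--     for j in range(len(rows[0])):
--         for k in range(len(rows[1])):
--             pair = add_rows(rows[0][j], rows[1][k])
--             if pair:
--                 for l in range(len(rows[2])):
--                     combined = add_rows(pair, rows[2][l])
--                     if combined:
--                         return combined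
-- ===== Notes on version B (the rewrite author's own statement) =====
-- stated objective: simpler
-- what changed: B fuses A's two phases (materialising the full first_pair list of all compatible (j,k) pairs, then scanning it against rows[2]) into one triple-nested loop that computes each add_rows result once and returns the first compatible grid; A also recomputes each add_rows call up to three times (comprehension filter, comprehension value, and again on return).
import Mathlib
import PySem

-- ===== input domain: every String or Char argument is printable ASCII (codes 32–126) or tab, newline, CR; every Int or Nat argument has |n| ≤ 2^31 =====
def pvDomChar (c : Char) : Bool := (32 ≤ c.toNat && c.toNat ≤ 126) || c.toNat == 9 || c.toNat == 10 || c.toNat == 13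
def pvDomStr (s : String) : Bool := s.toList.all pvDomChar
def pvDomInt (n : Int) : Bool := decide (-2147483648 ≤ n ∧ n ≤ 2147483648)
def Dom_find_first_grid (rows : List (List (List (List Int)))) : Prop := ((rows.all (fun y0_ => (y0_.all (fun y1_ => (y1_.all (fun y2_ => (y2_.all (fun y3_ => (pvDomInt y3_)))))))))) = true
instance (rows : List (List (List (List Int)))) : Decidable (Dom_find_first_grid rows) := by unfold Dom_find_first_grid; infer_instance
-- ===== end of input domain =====

-- B fuses A's two phases (build the full first_pair list, then scan it) into one
-- triple-nested loop computing each add_rows result once (A computes it up to three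
-- times per candidate); add_rows's column scan and ordered row2 scan are kept, so the
-- return value is identical on every input on which the Python A returns.

-- ===== PORT A =====
-- Python truthiness of add_rows's result: False ↦ none, a list ↦ nonempty?
def pvTruthy (o : Option (List (List Int))) : Bool :=
  match o with
  | none => false
  | some g => decide (g ≠ [])

-- col_set = set(); for row in range(len(row1)): col_set.add(row1[row][col])
-- (out-of-range indexing uses pyGetD defaults, exact under Pre_)
def colSetA (row1 : List (List Int)) (c : Nat) : PySem.Set Int :=
  (PySem.List.pyRange 0 (row1.length : Int) 1).foldl
    (fun s i => PySem.Set.add s (PySem.List.pyGetD (PySem.List.pyGetD row1 i []) (c : Int) 0))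
    PySem.Set.empty

-- for row in range(len(row2)): if row2[row][col] in col_set: return False
def scanR2A (row1 row2 : List (List Int)) (c : Nat) : Bool :=
  (PySem.List.pyRange 0 (row2.length : Int) 1).any
    (fun i => PySem.Set.contains (colSetA row1 c) (PySem.List.pyGetD (PySem.List.pyGetD row2 i []) (c : Int) 0))

-- the outer `for col in range(len(row1[0]))` loop of add_rows
def addRowsGoA (row1 row2 : List (List Int)) : List Nat → Option (List (List Int))
  | [] => some (row1 ++ row2)
  | c :: rest =>
      if scanR2A row1 row2 c then none
      else addRowsGoA row1 row2 rest

def addRowsA (row1 row2 : List (List Int)) : Option (List (List Int)) :=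
  addRowsGoA row1 row2 (List.range (PySem.List.pyGetD row1 0 []).length)

-- first_pair = [add_rows(rows[0][j], rows[1][k]) for j … for k … if add_rows(rows[0][j], rows[1][k])]
def firstPairA (g0 g1 : List (List (List Int))) : List (List (List Int)) :=
  g0.flatMap (fun a =>
    g1.filterMap (fun b =>
      if pvTruthy (addRowsA a b) then addRowsA a b else none))

-- inner loop: for k in range(len(rows[2])): if add_rows(first_pair[j], rows[2][k]): return add_rows(…)
def scanThirdA (p : List (List Int)) : List (List (List Int)) → Option (List (List Int))
  | [] => none
  | c :: rest =>
      if pvTruthy (addRowsA p c) then addRowsA p c else scanThirdA p rest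

-- outer loop: for j in range(len(first_pair))
def searchA (g2 : List (List (List Int))) : List (List (List Int)) → Option (List (List Int))
  | [] => none
  | p :: rest =>
      match scanThirdA p g2 with
      | some v => some v
      | none => searchA g2 rest

def find_first_grid (rows : List (List (List (List Int)))) : Option (List (List Int)) :=
  let first_pair := firstPairA (PySem.List.pyGetD rows 0 []) (PySem.List.pyGetD rows 1 [])
  searchA (PySem.List.pyGetD rows 2 []) first_pair

-- ===== PORT B =====
-- col_set = {r[col] for r in row1}
def colValsB (row1 : List (List Int)) (c : Nat) : PySem.Set Int :=
  PySem.Set.ofList (row1.map (fun r => PySem.List.pyGetD r (c : Int) 0))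

-- add_rows of Source B: same column loop; the row2 scan iterates rows directly
def addRowsGoB (row1 row2 : List (List Int)) : List Nat → Option (List (List Int))
  | [] => some (row1 ++ row2)
  | c :: rest =>
      if row2.any (fun r => PySem.Set.contains (colValsB row1 c) (PySem.List.pyGetD r (c : Int) 0)) then
        none
      else addRowsGoB row1 row2 rest

def addRowsB (row1 row2 : List (List Int)) : Option (List (List Int)) :=
  addRowsGoB row1 row2 (List.range (PySem.List.pyGetD row1 0 []).length)

-- innermost loop over rows[2]: combined = add_rows(pair, rows[2][l]); if combined: return combined
def scanThirdB (p : List (List Int)) : List (List (List Int)) → Option (List (List Int))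
  | [] => none
  | c :: rest =>
      match addRowsB p c with
      | some combined => if combined.isEmpty then scanThirdB p rest else some combined
      | none => scanThirdB p rest

-- middle loop over rows[1]: pair = add_rows(rows[0][j], rows[1][k]); if pair: scan rows[2]
def fusedK (a : List (List Int)) (g2 : List (List (List Int))) : List (List (List Int)) → Option (List (List Int))
  | [] => none
  | b :: rest =>
      match addRowsB a b with
      | some pair =>
          if pair.isEmpty then fusedK a g2 rest
          else
            match scanThirdB pair g2 with
            | some v => some v
            | none => fusedK a g2 rest
      | none => fusedK a g2 rest

-- outer loop over rows[0]
def fusedJ (g1 g2 : List (List (List Int))) : List (List (List Int)) → Option (List (List Int))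
  | [] => none
  | a :: rest =>
      match fusedK a g2 g1 with
      | some v => some v
      | none => fusedJ g1 g2 rest

def find_first_grid_alt (rows : List (List (List (List Int)))) : Option (List (List Int)) :=
  fusedJ (PySem.List.pyGetD rows 1 []) (PySem.List.pyGetD rows 2 []) (PySem.List.pyGetD rows 0 [])

-- ===== PRECONDITION & SPEC =====
-- The values in column c of block r1 (as add_rows's col_set sees it)
def pvColSet (r1 : List (List Int)) (c : Nat) : List Int := r1.map (fun r => r.getD c 0)

-- column c is fully scanned without a clash or a short row, so add_rows moves on to column c+1
def pvColPass (r1 r2 : List (List Int)) (c : Nat) : Bool :=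
  ((r1 ++ r2).all fun r => decide (c < r.length)) &&
  (r2.all fun r => !((pvColSet r1 c).contains (r.getD c 0)))

-- column c, if reached, does not raise: all r1 rows reach c, and every r2 row the ordered
-- scan reaches before clashing also reaches c
def pvColNoRaise (r1 r2 : List (List Int)) (c : Nat) : Bool :=
  (r1.all fun r => decide (c < r.length)) &&
  ((List.range r2.length).all fun i =>
    !((List.range i).all fun i' =>
        decide (c < (r2.getD i' []).length) && !((pvColSet r1 c).contains ((r2.getD i' []).getD c 0))) ||
    decide (c < (r2.getD i []).length))

-- add_rows(r1, r2) returns (False or a grid) without raising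
def pvAddOK (r1 r2 : List (List Int)) : Bool :=
  !r1.isEmpty &&
  ((List.range (r1.headD []).length).all fun c =>
    !((List.range c).all fun c' => pvColPass r1 r2 c') || pvColNoRaise r1 r2 c)

-- add_rows(r1, r2) returns the (truthy) grid r1 ++ r2
def pvAddGrid (r1 r2 : List (List Int)) : Bool :=
  !r1.isEmpty && ((List.range (r1.headD []).length).all fun c => pvColPass r1 r2 c)

-- scanning the third group against pair p performs only non-raising add_rows calls
def pvScanOK (p : List (List Int)) (g2 : List (List (List Int))) : Bool :=
  (List.range g2.length).all fun l =>
    !((List.range l).all fun l' => pvAddOK p (g2.getD l' []) && !pvAddGrid p (g2.getD l' [])) ||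
    pvAddOK p (g2.getD l [])

-- the scan of the third group against pair p finds a compatible block
def pvSuccess (p : List (List Int)) (g2 : List (List (List Int))) : Bool :=
  (List.range g2.length).any fun l => pvAddGrid p (g2.getD l [])

-- phase 2: every truthy pair reached (no earlier truthy pair's scan succeeded) scans rows[2] safely
def pvThirdOK (g0 g1 g2 : List (List (List Int))) : Bool :=
  (List.range g0.length).all fun j => (List.range g1.length).all fun k =>
    !pvAddGrid (g0.getD j []) (g1.getD k []) ||
    !((List.range g0.length).all fun j' => (List.range g1.length).all fun k' =>
        !(decide (j' < j) || (decide (j' = j) && decide (k' < k))) ||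
        !pvAddGrid (g0.getD j' []) (g1.getD k' []) ||
        !pvSuccess (g0.getD j' [] ++ g1.getD k' []) g2) ||
    pvScanOK (g0.getD j [] ++ g1.getD k []) g2

-- Pre_ holds on exactly the inputs where the Python A returns (it raises IndexError on the
-- rest): every group access and every cell access the search actually performs is in range,
-- i.e. each add_rows call actually made either indexes in range throughout or exits via a
-- clash before its ordered scan reaches a too-short row.
def Pre_find_first_grid (rows : List (List (List (List Int)))) : Prop :=
  rows ≠ [] ∧
  (rows.getD 0 [] ≠ [] →
    2 ≤ rows.length ∧
    (∀ a ∈ rows.getD 0 [], ∀ b ∈ rows.getD 1 [], pvAddOK a b = true) ∧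
    ((∃ a ∈ rows.getD 0 [], ∃ b ∈ rows.getD 1 [], pvAddGrid a b = true) →
      3 ≤ rows.length ∧
      pvThirdOK (rows.getD 0 []) (rows.getD 1 []) (rows.getD 2 []) = true))

instance (rows : List (List (List (List Int)))) : Decidable (Pre_find_first_grid rows) := by
  unfold Pre_find_first_grid; infer_instance

def pvWitness_find_first_grid : List (List (List (List Int))) :=
  [[[[1]]], [[[2]]], [[[3]]]]

def Spec_find_first_grid (rows : List (List (List (List Int)))) (out : Option (List (List Int))) : Prop := out = find_first_grid_alt rows
instance (rows : List (List (List (List Int)))) (out : Option (List (List Int))) : Decidable (Spec_find_first_grid rows out) := by unfold Spec_find_first_grid; infer_instance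

-- ===== CLAIM (what is proved, stated in full; the proofs are below) =====
def Claim_equal_find_first_grid : Prop := ∀ (rows : List (List (List (List Int)))), Dom_find_first_grid rows → Pre_find_first_grid rows → Spec_find_first_grid rows (find_first_grid rows)

-- ===== LEMMAS AND PROOFS =====

-- A's index-loop per-column set equals B's comprehension set
theorem colSetA_eq_colValsB (row1 : List (List Int)) (c : Nat) :
    colSetA row1 c = colValsB row1 c := by
  unfold colSetA colValsB
  rw [PySem.List.foldl_pyRange_zero_pyGetD' row1 ([] : List Int)
        (fun s r => PySem.Set.add s (PySem.List.pyGetD r (c : Int) 0)) PySem.Set.empty,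
      ← PySem.Set.update_map_eq_foldl_add, PySem.Set.update_empty]

-- A's index scan of row2 equals B's direct-iteration scan
theorem scanR2A_eq (row1 row2 : List (List Int)) (c : Nat) :
    scanR2A row1 row2 c
      = row2.any (fun r => PySem.Set.contains (colValsB row1 c) (PySem.List.pyGetD r (c : Int) 0)) := by
  unfold scanR2A
  rw [colSetA_eq_colValsB]
  have hm := PySem.List.map_pyGetD_pyRange_zero' row2 ([] : List Int)
  calc (PySem.List.pyRange 0 (row2.length : Int) 1).any
          (fun i => PySem.Set.contains (colValsB row1 c) (PySem.List.pyGetD (PySem.List.pyGetD row2 i []) (c : Int) 0))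
      = ((PySem.List.pyRange 0 (row2.length : Int) 1).map (fun i => PySem.List.pyGetD row2 i [])).any
          (fun r => PySem.Set.contains (colValsB row1 c) (PySem.List.pyGetD r (c : Int) 0)) := by
        rw [List.any_map]; rfl
    _ = row2.any (fun r => PySem.Set.contains (colValsB row1 c) (PySem.List.pyGetD r (c : Int) 0)) := by
        rw [hm]

theorem addRows_eq (row1 row2 : List (List Int)) :
    addRowsA row1 row2 = addRowsB row1 row2 := by
  unfold addRowsA addRowsB
  generalize List.range (PySem.List.pyGetD row1 0 []).length = cols
  induction cols with
  | nil => rfl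
  | cons c rest ih =>
    simp only [addRowsGoA, addRowsGoB, scanR2A_eq]
    split_ifs with h
    · rfl
    · exact ih

theorem scanThird_eq (p : List (List Int)) (g2 : List (List (List Int))) :
    scanThirdA p g2 = scanThirdB p g2 := by
  induction g2 with
  | nil => rfl
  | cons c rest ih =>
    simp only [scanThirdA, scanThirdB, addRows_eq, ih]
    cases h : addRowsB p c with
    | none => simp [pvTruthy]
    | some v =>
      cases hv : v.isEmpty <;>
        simp_all [pvTruthy, List.isEmpty_iff]

theorem searchA_filterMap (a : List (List Int)) (g2 g1 : List (List (List Int))) :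
    searchA g2 (g1.filterMap (fun b => if pvTruthy (addRowsA a b) then addRowsA a b else none))
      = fusedK a g2 g1 := by
  induction g1 with
  | nil => rfl
  | cons b rest ih =>
    rw [List.filterMap_cons]
    cases h : addRowsB a b with
    | none =>
      have hA : addRowsA a b = none := (addRows_eq a b).trans h
      have ht : pvTruthy (addRowsA a b) = false := by simp [hA, pvTruthy]
      simp only [ht, Bool.false_eq_true, if_false]
      simpa [fusedK, h] using ih
    | some pair =>
      have hA : addRowsA a b = some pair := (addRows_eq a b).trans h
      cases hp : pair.isEmpty with
      | false =>
        have hne : pair ≠ [] := List.isEmpty_eq_false_iff.mp hp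
        have ht : pvTruthy (some pair) = true := by simp [pvTruthy, hne]
        simp only [hA, ht, if_true]
        simp only [searchA]
        rw [scanThird_eq]
        unfold fusedK
        rw [h]
        simp only [hp, Bool.false_eq_true, if_false]
        cases scanThirdB pair g2 <;> simp [ih]
      | true =>
        have he : pair = [] := List.isEmpty_iff.mp hp
        have ht : pvTruthy (some pair) = false := by simp [pvTruthy, he]
        simp only [hA, ht, Bool.false_eq_true, if_false]
        unfold fusedK
        rw [h]
        simp only [he, List.isEmpty_nil, if_true, ih]

theorem searchA_append (g2 xs ys : List (List (List Int))) :
    searchA g2 (xs ++ ys)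
      = match searchA g2 xs with
        | some v => some v
        | none => searchA g2 ys := by
  induction xs with
  | nil => rfl
  | cons p rest ih =>
    simp only [List.cons_append, searchA, ih]
    cases scanThirdA p g2 <;> rfl

theorem search_eq (g0 g1 g2 : List (List (List Int))) :
    searchA g2 (firstPairA g0 g1) = fusedJ g1 g2 g0 := by
  induction g0 with
  | nil => rfl
  | cons a rest ih =>
    unfold firstPairA
    rw [List.flatMap_cons, searchA_append, searchA_filterMap]
    unfold firstPairA at ih
    rw [fusedJ, ih]

-- ===== VERDICT (by name: the statement is the Claim_ definition above) =====
theorem find_first_grid_spec : Claim_equal_find_first_grid := by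
  intro rows _ _
  unfold Spec_find_first_grid find_first_grid find_first_grid_alt
  exact search_eq _ _ _
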